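-- pv_equiv track=rewrite | github.com/0JUUU/Python | Programmers/3진법_뒤집기.py | solution
-- ===== SOURCE A (Python) =====
-- def solution(n):
--     answer = 0
--     three = []
--     while n != 0:
--         three.append(n % 3)
--         n = n // 3
--
--     cnt = 1
--     for i in reversed(three):
--         answer += i * cnt
--         cnt *= 3
--
--     return answer
-- ===== SOURCE B (Python) =====
-- def solution(n):
--     answer = 0
--     while n != 0:
--         answer = answer * 3 + n % 3
--         n //= 3
--     return answer
-- ===== Notes on version B (the rewrite author's own statement) =====
-- stated objective: simpler
-- what changed: B folds A's two loops (collect the ternary digits, then re-evaluate them reversed with a running power) into a single Horner-style pass that accumulates the reversed ternary value directly, with no intermediate digit list.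
import Mathlib
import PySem

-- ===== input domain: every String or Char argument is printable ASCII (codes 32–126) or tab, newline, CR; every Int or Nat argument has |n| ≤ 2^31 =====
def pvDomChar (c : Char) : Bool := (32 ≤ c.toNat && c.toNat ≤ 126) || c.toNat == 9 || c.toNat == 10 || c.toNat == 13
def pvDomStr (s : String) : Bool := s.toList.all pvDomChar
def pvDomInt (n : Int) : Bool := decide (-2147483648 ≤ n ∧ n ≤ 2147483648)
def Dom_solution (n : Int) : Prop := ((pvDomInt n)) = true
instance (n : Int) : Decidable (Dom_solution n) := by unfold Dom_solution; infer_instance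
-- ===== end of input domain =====

-- B folds A's two loops (digit collection, then reversed re-evaluation) into one Horner-style pass with no intermediate list; equivalence proved for nonnegative n (both loop forever on negative n).


-- ===== PORT A =====
-- 'while n != 0: three.append(n % 3); n = n // 3' — fuel n.toNat + 1 only makes the loop total in Lean
def solDigitsLoop : Nat → Int → List Int → List Int
  | 0, _, three => three
  | f + 1, n, three =>
    if n ≠ 0 then solDigitsLoop f (PySem.Int.floordiv n 3) (three ++ [PySem.Int.mod n 3])
    else three

def solution (n : Int) : Int :=
  let three := solDigitsLoop (n.toNat + 1) n []
  -- 'cnt = 1; for i in reversed(three): answer += i * cnt; cnt *= 3'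
  (three.reverse.foldl (fun (p : Int × Int) i => (p.1 + i * p.2, p.2 * 3)) (0, 1)).1

-- ===== PORT B =====
-- 'while n != 0: answer = answer * 3 + n % 3; n //= 3' — same fuel guard for totality
def solHornerLoop : Nat → Int → Int → Int
  | 0, _, answer => answer
  | f + 1, n, answer =>
    if n ≠ 0 then solHornerLoop f (PySem.Int.floordiv n 3) (answer * 3 + PySem.Int.mod n 3)
    else answer

def solution_alt (n : Int) : Int := solHornerLoop (n.toNat + 1) n 0

-- ===== PRECONDITION & SPEC =====
-- Both A and B loop forever for n < 0 (n // 3 never reaches 0); Pre_ restricts to nonnegative n.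
def Pre_solution (n : Int) : Prop := 0 ≤ n
instance (n : Int) : Decidable (Pre_solution n) := by unfold Pre_solution; infer_instance
def pvWitness_solution : Int := 45
def Spec_solution (n : Int) (out : Int) : Prop := out = solution_alt n
instance (n : Int) (out : Int) : Decidable (Spec_solution n out) := by unfold Spec_solution; infer_instance

-- ===== CLAIM (what is proved, stated in full; the proofs are below) =====
def Claim_equal_solution : Prop := ∀ (n : Int), Dom_solution n → Pre_solution n → Spec_solution n (solution n)

-- ===== LEMMAS AND PROOFS =====

-- digitsLoop appends to its accumulator
theorem solDigitsLoop_acc (f : Nat) (n : Int) (three : List Int) :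
    solDigitsLoop f n three = three ++ solDigitsLoop f n [] := by
  induction f generalizing n three with
  | zero => simp [solDigitsLoop]
  | succ f ih =>
    by_cases h : n = 0
    · simp [solDigitsLoop, h]
    · rw [solDigitsLoop, solDigitsLoop, if_pos h, if_pos h, ih (three := three ++ _), ih (three := [] ++ _)]
      simp

-- foldr form of A's evaluation of the digit list
def solEval (l : List Int) : Int × Int :=
  l.foldr (fun i (p : Int × Int) => (p.1 + i * p.2, p.2 * 3)) (0, 1)

theorem solEval_eq (l : List Int) :
    (l.reverse.foldl (fun (p : Int × Int) i => (p.1 + i * p.2, p.2 * 3)) (0, 1)) = solEval l := by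
  simp [solEval, List.foldl_reverse]

-- main invariant: with enough fuel, B's Horner loop equals A's evaluation of A's digit list
theorem sol_main (f : Nat) : ∀ (n a : Int), 0 ≤ n → n.toNat < f →
    solHornerLoop f n a = a * (solEval (solDigitsLoop f n [])).2 + (solEval (solDigitsLoop f n [])).1 := by
  induction f with
  | zero => intro n a _ h; omega
  | succ f ih =>
    intro n a hn hf
    by_cases h : n = 0
    · simp [solHornerLoop, solDigitsLoop, solEval, h]
    · have h3 : PySem.Int.floordiv n 3 = n / 3 := PySem.Int.floordiv_eq_ediv_of_pos (by omega)
      have hn' : 0 ≤ PySem.Int.floordiv n 3 := by rw [h3]; omega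
      have hlt : (PySem.Int.floordiv n 3).toNat < f := by
        rw [h3]; omega
      rw [solHornerLoop, solDigitsLoop, if_pos h, if_pos h,
        solDigitsLoop_acc, ih _ _ hn' hlt]
      simp [solEval]
      ring

-- ===== VERDICT (by name: the statement is the Claim_ definition above) =====
theorem solution_spec : Claim_equal_solution := by
  intro n _ hn
  unfold Spec_solution solution solution_alt
  simp only []
  rw [solEval_eq, sol_main (n.toNat + 1) n 0 hn (by omega)]
  ring
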